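-- pv_equiv track=rewrite | github.com/jiajunmao/Foo-Bar | Level-1/Level 1.py | answer
-- ===== SOURCE A (Python) =====
-- def answer(s):
--     decrypt = "";
--     for i in range(0, len(s)):
--         ascii = ord(s[i]);
--         if (ascii <= 122 and ascii >= 97):
--             decrypt += chr(97 + 122 - ascii);
--         else:
--             decrypt += chr(ascii);
--
--     return decrypt;
-- ===== SOURCE B (Python) =====
-- def answer(s):
--     if len(s) == 0:
--         return ""
--     if len(s) == 1:
--         o = ord(s)
--         return chr(219 - o) if 97 <= o <= 122 else s
--     m = len(s) // 2
--     return answer(s[:m]) + answer(s[m:])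
-- ===== Notes on version B (the rewrite author's own statement) =====
-- stated objective: alternative
-- what changed: Replaces the index loop with repeated string concatenation by a divide-and-conquer recursion that splits the string into halves and maps only single characters at the base case.
import Mathlib
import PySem

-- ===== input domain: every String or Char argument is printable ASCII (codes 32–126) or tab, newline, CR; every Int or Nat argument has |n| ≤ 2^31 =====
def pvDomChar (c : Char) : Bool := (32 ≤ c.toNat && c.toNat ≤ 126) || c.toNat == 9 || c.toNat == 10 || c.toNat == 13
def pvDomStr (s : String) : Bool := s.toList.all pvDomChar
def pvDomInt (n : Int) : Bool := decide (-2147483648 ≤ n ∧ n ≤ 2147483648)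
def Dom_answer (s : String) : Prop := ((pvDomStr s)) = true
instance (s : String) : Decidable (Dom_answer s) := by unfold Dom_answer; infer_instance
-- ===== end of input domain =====

-- B replaces A's index loop (accumulator + concatenation) by a divide-and-conquer
-- recursion on string halves, mapping single characters only at the base case.

-- ===== PORT A =====
def answer (s : String) : String :=
  String.ofList ((PySem.List.pyRange 0 (s.toList.length : Int) 1).foldl
    (fun acc i =>
      let ascii : Nat := (PySem.List.pyGetD s.toList i ' ').toNat
      if ascii ≤ 122 ∧ 97 ≤ ascii then acc ++ [Char.ofNat (97 + 122 - ascii)]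
      else acc ++ [Char.ofNat ascii]) [])

-- ===== PORT B =====
-- Source B: len(s)==0 → "", len(s)==1 → mapped char, else recurse on s[:m] and s[m:], m = len//2
def answerAltGo : List Char → List Char
  | [] => []
  | [c] => if 97 ≤ c.toNat ∧ c.toNat ≤ 122 then [Char.ofNat (219 - c.toNat)] else [c]
  | a :: b :: t =>
      let l := a :: b :: t
      let m := l.length / 2
      answerAltGo (l.take m) ++ answerAltGo (l.drop m)
termination_by l => l.length
decreasing_by
  · simp [List.length_take]; omega
  · simp [List.length_drop]; omega

def answer_alt (s : String) : String := String.ofList (answerAltGo s.toList)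

-- ===== PRECONDITION & SPEC =====
def Spec_answer (s : String) (out : String) : Prop := out = answer_alt s
instance (s : String) (out : String) : Decidable (Spec_answer s out) := by unfold Spec_answer; infer_instance

-- ===== CLAIM (what is proved, stated in full; the proofs are below) =====
def Claim_equal_answer : Prop := ∀ (s : String), Dom_answer s → Spec_answer s (answer s)

-- ===== LEMMAS AND PROOFS =====

-- the divide-and-conquer recursion computes the per-character Atbash map
theorem answerAltGo_eq_map (l : List Char) :
    answerAltGo l = l.map (fun c =>
      if 97 ≤ c.toNat ∧ c.toNat ≤ 122 then Char.ofNat (219 - c.toNat) else c) := by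
  match l with
  | [] => simp [answerAltGo]
  | [c] => simp only [answerAltGo, List.map_cons, List.map_nil]; split_ifs <;> rfl
  | a :: b :: t =>
      rw [answerAltGo]
      have h1 := answerAltGo_eq_map ((a :: b :: t).take ((a :: b :: t).length / 2))
      have h2 := answerAltGo_eq_map ((a :: b :: t).drop ((a :: b :: t).length / 2))
      simp only [] at h1 h2 ⊢
      rw [h1, h2, ← List.map_append, List.take_append_drop]
termination_by l.length
decreasing_by
  · simp [List.length_take]; omega
  · simp [List.length_drop]; omega

-- A's loop computes the same per-character map
theorem answerFold_eq_map (l : List Char) (acc : List Char) :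
    l.foldl (fun acc c =>
        if c.toNat ≤ 122 ∧ 97 ≤ c.toNat then acc ++ [Char.ofNat (97 + 122 - c.toNat)]
        else acc ++ [Char.ofNat c.toNat]) acc
      = acc ++ l.map (fun c =>
          if c.toNat ≤ 122 ∧ 97 ≤ c.toNat then Char.ofNat (97 + 122 - c.toNat)
          else Char.ofNat c.toNat) := by
  induction l generalizing acc with
  | nil => simp
  | cons x t ih =>
    rw [List.foldl_cons]
    split_ifs with h
    · rw [List.map_cons, if_pos h, ih]; simp
    · rw [List.map_cons, if_neg h, ih]; simp

-- ===== VERDICT (by name: the statement is the Claim_ definition above) =====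
theorem answer_spec : Claim_equal_answer := by
  unfold Claim_equal_answer Spec_answer answer answer_alt
  intro s _
  rw [PySem.List.foldl_pyRange_zero_pyGetD' s.toList ' '
        (fun acc c => if c.toNat ≤ 122 ∧ 97 ≤ c.toNat then acc ++ [Char.ofNat (97 + 122 - c.toNat)]
                      else acc ++ [Char.ofNat c.toNat]) []]
  rw [answerFold_eq_map, answerAltGo_eq_map]
  simp only [List.nil_append]
  congr 1
  apply List.map_congr_left
  intro c _
  by_cases h : 97 ≤ c.toNat ∧ c.toNat ≤ 122
  · rw [if_pos ⟨h.2, h.1⟩, if_pos h]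
  · rw [if_neg (fun hh => h ⟨hh.2, hh.1⟩), if_neg h, Char.ofNat_toNat]
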